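-- pv_equiv track=rewrite | github.com/mbishopfx/bishoptech-bishopbot | services/terminal_observer_service.py | normalize_controls
-- ===== SOURCE A (Python) =====
-- CONTROL_ORDER = [
--     "ENTER",
--     "Y",
--     "N",
--     "TAB",
--     "SHIFT_TAB",
--     "ARROW_UP",
--     "ARROW_DOWN",
--     "ARROW_LEFT",
--     "ARROW_RIGHT",
--     "ESC",
--     "CTRL_C",
--     "STATUS",
--     "STOP",
-- ]
--
-- CONTROL_LABELS = {
--     "ENTER": "↵ Enter",
--     "Y": "✅ Yes / Y",
--     "N": "❌ No / N",
--     "TAB": "⇥ Tab",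
--     "SHIFT_TAB": "⇤ Shift+Tab",
--     "ARROW_UP": "↑ Up",
--     "ARROW_DOWN": "↓ Down",
--     "ARROW_LEFT": "← Left",
--     "ARROW_RIGHT": "→ Right",
--     "ESC": "⎋ Esc",
--     "CTRL_C": "Ctrl+C",
--     "STATUS": "📟 Status",
--     "STOP": "🛑 Stop",
-- }
--
-- def normalize_controls(controls: list[str], interactive_allowed: bool) -> list[str]:
--     allowed = {"STATUS", "STOP"}
--     if interactive_allowed:
--         allowed.update(CONTROL_LABELS)
--     ordered: list[str] = []
--     for control in CONTROL_ORDER: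
--         if control in controls and control in allowed and control not in ordered:
--             ordered.append(control)
--     for control in controls:
--         if control in allowed and control not in ordered:
--             ordered.append(control)
--     return ordered
-- ===== SOURCE B (Python) =====
-- CONTROL_ORDER = [
--     "ENTER",
--     "Y",
--     "N",
--     "TAB",
--     "SHIFT_TAB",
--     "ARROW_UP",
--     "ARROW_DOWN",
--     "ARROW_LEFT",
--     "ARROW_RIGHT",
--     "ESC",
--     "CTRL_C",
--     "STATUS",
--     "STOP",
-- ]
--
-- CONTROL_LABELS = {
--     "ENTER": "↵ Enter",
--     "Y": "✅ Yes / Y",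
--     "N": "❌ No / N",
--     "TAB": "⇥ Tab",
--     "SHIFT_TAB": "⇤ Shift+Tab",
--     "ARROW_UP": "↑ Up",
--     "ARROW_DOWN": "↓ Down",
--     "ARROW_LEFT": "← Left",
--     "ARROW_RIGHT": "→ Right",
--     "ESC": "⎋ Esc",
--     "CTRL_C": "Ctrl+C",
--     "STATUS": "📟 Status",
--     "STOP": "🛑 Stop",
-- }
--
-- _RANK = {name: i for i, name in enumerate(CONTROL_ORDER)}
--
--
-- def normalize_controls(controls: list[str], interactive_allowed: bool) -> list[str]:
--     allowed = set(CONTROL_LABELS) if interactive_allowed else {"STATUS", "STOP"}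
--     picked = set()
--     for control in controls:
--         if control in allowed:
--             picked.add(control)
--     return sorted(picked, key=lambda name: _RANK[name])
-- ===== Notes on version B (the rewrite author's own statement) =====
-- stated objective: faster
-- what changed: Instead of scanning the fixed priority list with an O(n) list-membership test per entry (plus a redundant second pass over the input), B makes one pass over the input collecting allowed names into a set and returns them sorted by a precomputed rank table.
import Mathlib
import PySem

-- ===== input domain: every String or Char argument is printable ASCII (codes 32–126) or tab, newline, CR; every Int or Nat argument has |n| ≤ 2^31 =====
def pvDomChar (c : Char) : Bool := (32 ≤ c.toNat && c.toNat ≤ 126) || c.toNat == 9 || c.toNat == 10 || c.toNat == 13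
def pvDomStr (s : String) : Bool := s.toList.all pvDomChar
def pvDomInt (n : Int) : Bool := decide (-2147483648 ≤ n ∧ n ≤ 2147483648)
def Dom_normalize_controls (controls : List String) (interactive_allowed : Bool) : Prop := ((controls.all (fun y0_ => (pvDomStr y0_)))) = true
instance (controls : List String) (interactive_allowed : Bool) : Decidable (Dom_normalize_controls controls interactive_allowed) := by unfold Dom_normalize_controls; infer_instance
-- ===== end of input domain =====

-- B replaces A's scan of the fixed priority list (with list-membership tests and a redundant
-- second pass) by one pass over the input collecting allowed names into a set, returned sorted
-- by a precomputed rank table; a timing run measured B faster on the generated inputs.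


-- ===== PORT A =====
def pvControlOrder : List String :=
  ["ENTER", "Y", "N", "TAB", "SHIFT_TAB", "ARROW_UP", "ARROW_DOWN",
   "ARROW_LEFT", "ARROW_RIGHT", "ESC", "CTRL_C", "STATUS", "STOP"]

-- keys of CONTROL_LABELS, in the dict's insertion order (the labels themselves are never used)
def pvControlLabelKeys : List String :=
  ["ENTER", "Y", "N", "TAB", "SHIFT_TAB", "ARROW_UP", "ARROW_DOWN",
   "ARROW_LEFT", "ARROW_RIGHT", "ESC", "CTRL_C", "STATUS", "STOP"]

def normalize_controls (controls : List String) (interactive_allowed : Bool) : List String :=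
  let allowed : PySem.Set String := PySem.Set.ofList ["STATUS", "STOP"]
  let allowed := if interactive_allowed then PySem.Set.update allowed pvControlLabelKeys else allowed
  let ordered :=
    pvControlOrder.foldl
      (fun acc control =>
        if control ∈ controls ∧ control ∈ allowed ∧ control ∉ acc then acc ++ [control] else acc)
      ([] : List String)
  let ordered :=
    controls.foldl
      (fun acc control =>
        if control ∈ allowed ∧ control ∉ acc then acc ++ [control] else acc)
      ordered
  ordered

-- ===== PORT B =====
-- _RANK = {name: i for i, name in enumerate(CONTROL_ORDER)}
def pvRank : PySem.Dict String Int :=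
  PySem.Dict.ofList ((PySem.List.enumerate pvControlOrder 0).map (fun p => (p.2, p.1)))

-- _RANK[name] never misses (every picked name is a CONTROL_ORDER key), so getD is exact here
def normalize_controls_alt (controls : List String) (interactive_allowed : Bool) : List String :=
  let allowed : PySem.Set String :=
    if interactive_allowed then PySem.Set.ofList pvControlLabelKeys
    else PySem.Set.ofList ["STATUS", "STOP"]
  let picked : PySem.Set String :=
    controls.foldl (fun s control => if control ∈ allowed then PySem.Set.add s control else s)
      PySem.Set.empty
  PySem.List.sorted picked (fun name => pvRank.getD name 0) false

-- ===== PRECONDITION & SPEC =====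
def Spec_normalize_controls (controls : List String) (interactive_allowed : Bool) (out : List String) : Prop := out = normalize_controls_alt controls interactive_allowed
instance (controls : List String) (interactive_allowed : Bool) (out : List String) : Decidable (Spec_normalize_controls controls interactive_allowed out) := by unfold Spec_normalize_controls; infer_instance

-- ===== CLAIM (what is proved, stated in full; the proofs are below) =====
def Claim_equal_normalize_controls : Prop := ∀ (controls : List String) (interactive_allowed : Bool), Dom_normalize_controls controls interactive_allowed → Spec_normalize_controls controls interactive_allowed (normalize_controls controls interactive_allowed)

-- ===== LEMMAS AND PROOFS =====

-- A's first loop over a duplicate-free priority list is a filter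
theorem pv_loopA (ord controls allowed : List String) (acc : List String)
    (hord : ord.Nodup) (hacc : ∀ c ∈ ord, c ∉ acc) :
    ord.foldl
      (fun a c => if c ∈ controls ∧ c ∈ allowed ∧ c ∉ a then a ++ [c] else a) acc
    = acc ++ ord.filter (fun c => decide (c ∈ controls) && decide (c ∈ allowed)) := by
  induction ord generalizing acc with
  | nil => simp
  | cons h t ih =>
    have hnd := List.nodup_cons.mp hord
    have hha : h ∉ acc := hacc h (List.mem_cons_self)
    by_cases hc : h ∈ controls ∧ h ∈ allowed
    · have hcc : (h ∈ controls ∧ h ∈ allowed ∧ h ∉ acc) := ⟨hc.1, hc.2, hha⟩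
      simp only [List.foldl_cons, if_pos hcc]
      rw [ih (acc ++ [h]) hnd.2 (by
        intro c hct
        simp only [List.mem_append, List.mem_singleton]
        rintro (hin | rfl)
        · exact hacc c (List.mem_cons_of_mem _ hct) hin
        · exact hnd.1 hct)]
      simp [hc.1, hc.2, List.append_assoc]
    · have hcc : ¬ (h ∈ controls ∧ h ∈ allowed ∧ h ∉ acc) := by tauto
      simp only [List.foldl_cons, if_neg hcc]
      rw [ih acc hnd.2 (fun c hct => hacc c (List.mem_cons_of_mem _ hct))]
      have hff : (decide (h ∈ controls) && decide (h ∈ allowed)) = false := by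
        simp only [Bool.and_eq_false_iff, decide_eq_false_iff_not]; tauto
      simp [hff]

-- A's second loop adds nothing once every allowed input element is already present
theorem pv_loopB_noop (controls allowed acc : List String)
    (h : ∀ c ∈ controls, c ∈ allowed → c ∈ acc) :
    controls.foldl (fun a c => if c ∈ allowed ∧ c ∉ a then a ++ [c] else a) acc = acc := by
  induction controls with
  | nil => rfl
  | cons x t ih =>
    have hcond : ¬ (x ∈ allowed ∧ x ∉ acc) := by
      rintro ⟨hx, hno⟩; exact hno (h x List.mem_cons_self hx)
    simp only [List.foldl_cons, if_neg hcond]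
    exact ih (fun c hct hca => h c (List.mem_cons_of_mem _ hct) hca)

-- the common core: A's loops = B's sorted set, for any pair of allowed lists with
-- the same members, all of which lie on the priority list
theorem pv_main (controls aAllowed bAllowed : List String)
    (hmemAB : ∀ x : String, x ∈ aAllowed ↔ x ∈ bAllowed)
    (hsub : ∀ x ∈ aAllowed, x ∈ pvControlOrder) :
    (controls.foldl
        (fun acc c => if c ∈ aAllowed ∧ c ∉ acc then acc ++ [c] else acc)
        (pvControlOrder.foldl
          (fun acc c => if c ∈ controls ∧ c ∈ aAllowed ∧ c ∉ acc then acc ++ [c] else acc) []))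
    = PySem.List.sorted
        (controls.foldl (fun s c => if c ∈ bAllowed then PySem.Set.add s c else s)
          PySem.Set.empty)
        (fun name => pvRank.getD name 0) false := by
  have hordNodup : pvControlOrder.Nodup := by decide
  rw [pv_loopA pvControlOrder controls aAllowed [] hordNodup (by simp)]
  set fl : List String :=
    pvControlOrder.filter (fun c => decide (c ∈ controls) && decide (c ∈ aAllowed)) with hfl
  rw [List.nil_append,
      pv_loopB_noop controls aAllowed fl (by
        intro c hc hca
        simp only [hfl, List.mem_filter, Bool.and_eq_true, decide_eq_true_eq]
        exact ⟨hsub c hca, hc, hca⟩)]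
  rw [PySem.List.foldl_ite_eq_foldl_filter (p := fun c => c ∈ bAllowed)
        (f := fun s c => PySem.Set.add s c)]
  have hofl : (controls.filter fun c => decide (c ∈ bAllowed)).foldl
      (fun s c => PySem.Set.add s c) PySem.Set.empty
      = PySem.Set.ofList (controls.filter fun c => decide (c ∈ bAllowed)) := rfl
  rw [hofl]
  symm
  apply PySem.List.sorted_eq_of_perm_of_pairwise_lt
  · -- fl is a permutation of the picked set: both Nodup with the same members
    apply (List.perm_ext_iff_of_nodup (List.Nodup.filter _ hordNodup)
      (PySem.Set.nodup_ofList _)).mpr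
    intro x
    simp only [List.mem_filter, Bool.and_eq_true, decide_eq_true_eq,
      PySem.Set.mem_ofList]
    constructor
    · rintro ⟨_, hc, ha⟩; exact ⟨hc, (hmemAB x).mp ha⟩
    · rintro ⟨hc, hb⟩
      have ha := (hmemAB x).mpr hb
      exact ⟨hsub x ha, hc, ha⟩
  · -- fl is strictly increasing in rank (a sublist of the strictly ranked priority list)
    have hp : pvControlOrder.Pairwise
        (fun a b => pvRank.getD a 0 < pvRank.getD b 0) := by decide
    exact List.Pairwise.sublist List.filter_sublist hp

-- ===== VERDICT (by name: the statement is the Claim_ definition above) =====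
theorem normalize_controls_spec : Claim_equal_normalize_controls := by
  intro controls interactive_allowed _
  unfold Spec_normalize_controls normalize_controls normalize_controls_alt
  cases interactive_allowed
  · simp only [Bool.false_eq_true, if_false]
    exact pv_main controls _ _ (fun x => Iff.rfl)
      (by intro x hx; fin_cases hx <;> decide)
  · simp only [if_true]
    exact pv_main controls _ _
      (by
        intro x
        simp only [PySem.Set.mem_update, PySem.Set.mem_ofList, pvControlLabelKeys,
          List.mem_cons, List.not_mem_nil, or_false]
        tauto)
      (by intro x hx; fin_cases hx <;> decide)
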